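-- pv_equiv track=rewrite | github.com/tszwong/BU-CS-131 | ps7/ps7.py | are_parts_nonoverlapping
-- ===== SOURCE A (Python) =====
-- def are_parts_nonoverlapping(p):
--
--     for x in p:
--         for y in p:
--             if x != y:
--                 for i in x:
--                     if i in y:
--                         return False
--
--     return True
-- ===== SOURCE B (Python) =====
-- def are_parts_nonoverlapping(p):
--     # keep only the distinct part values (A treats equal-valued parts as the same part)
--     seen = set()
--     parts = []
--     for part in p:
--         key = tuple(part)
--         if key not in seen:
--             seen.add(key)
--             parts.append(part)
--     # one pass: each element remembers the first part value owning it
--     owner = {}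
--     for part in parts:
--         for e in part:
--             o = owner.get(e)
--             if o is None:
--                 owner[e] = part
--             elif o != part:
--                 return False
--     return True
-- ===== Notes on version B (the rewrite author's own statement) =====
-- stated objective: alternative
-- what changed: Replaced the all-pairs scan (for each ordered pair of distinct-valued parts, test every element of one for membership in the other) by deduplicating the distinct part values once and then making a single pass that records each element's first owning part in a dict, returning False as soon as an element reappears in a part with a different value.
import Mathlib
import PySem

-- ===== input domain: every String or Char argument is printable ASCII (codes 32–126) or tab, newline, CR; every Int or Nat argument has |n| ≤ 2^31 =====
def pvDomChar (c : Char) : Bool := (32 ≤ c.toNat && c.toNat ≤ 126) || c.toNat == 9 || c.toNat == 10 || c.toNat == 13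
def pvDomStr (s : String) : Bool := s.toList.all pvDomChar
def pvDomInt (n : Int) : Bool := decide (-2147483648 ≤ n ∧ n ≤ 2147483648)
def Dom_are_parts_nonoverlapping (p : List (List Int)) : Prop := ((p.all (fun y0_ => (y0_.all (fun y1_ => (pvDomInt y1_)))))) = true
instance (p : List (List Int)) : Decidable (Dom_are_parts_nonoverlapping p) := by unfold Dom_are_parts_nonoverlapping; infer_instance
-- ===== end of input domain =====

-- B replaces A's all-pairs membership scan by a dedup of the distinct part values
-- followed by one pass over the elements with an element → first-owning-part
-- dictionary (objective: a genuinely different, single-pass algorithm).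

-- ===== PORT A =====
-- for x in p: for y in p: if x != y: for i in x: if i in y: return False; return True
def are_parts_nonoverlapping (p : List (List Int)) : Bool :=
  !(p.any (fun x => p.any (fun y => (x != y) && x.any (fun i => y.contains i))))

-- ===== PORT B =====
-- first loop of Source B: keep the distinct part values, first occurrences in order
def apnDedup : List (List Int) → PySem.Set (List Int) → List (List Int)
  | [], _ => []
  | part :: rest, seen =>
    if PySem.Set.contains seen part then apnDedup rest seen
    else part :: apnDedup rest (PySem.Set.add seen part)

-- inner loop of Source B: for e in part: look e up in owner; absent → record part;
-- present with a different value → return False (modelled as `none`).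
def apnInner (part : List Int) : List Int → PySem.Dict Int (List Int) →
    Option (PySem.Dict Int (List Int))
  | [], d => some d
  | e :: es, d =>
    match d.get? e with
    | none => apnInner part es (d.insert e part)
    | some o => if o ≠ part then none else apnInner part es d

-- outer loop of Source B over the parts, threading the owner dict
def apnGo : List (List Int) → PySem.Dict Int (List Int) → Bool
  | [], _ => true
  | part :: rest, d =>
    match apnInner part part d with
    | none => false
    | some d' => apnGo rest d'

def are_parts_nonoverlapping_alt (p : List (List Int)) : Bool :=
  apnGo (apnDedup p PySem.Set.empty) PySem.Dict.empty

-- ===== PRECONDITION & SPEC =====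
def Spec_are_parts_nonoverlapping (p : List (List Int)) (out : Bool) : Prop := out = are_parts_nonoverlapping_alt p
instance (p : List (List Int)) (out : Bool) : Decidable (Spec_are_parts_nonoverlapping p out) := by unfold Spec_are_parts_nonoverlapping; infer_instance

-- ===== CLAIM (what is proved, stated in full; the proofs are below) =====
def Claim_equal_are_parts_nonoverlapping : Prop := ∀ (p : List (List Int)), Dom_are_parts_nonoverlapping p → Spec_are_parts_nonoverlapping p (are_parts_nonoverlapping p)

-- ===== LEMMAS AND PROOFS =====

-- the inner loop fails exactly when some element of `es` is already owned by a part with a different value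
lemma apnInner_eq_none_iff (part : List Int) (es : List Int) (d : PySem.Dict Int (List Int)) :
    apnInner part es d = none ↔ ∃ e ∈ es, ∃ v, d.get? e = some v ∧ v ≠ part := by
  induction es generalizing d with
  | nil => simp [apnInner]
  | cons e es ih =>
    cases h : d.get? e with
    | none =>
      simp only [apnInner, h]
      rw [ih]
      constructor
      · rintro ⟨e', he', v, hv, hne⟩
        rw [PySem.Dict.get?_insert] at hv
        by_cases hee : e' = e
        · rw [if_pos hee] at hv
          cases hv; exact absurd rfl hne
        · rw [if_neg hee] at hv
          exact ⟨e', List.mem_cons_of_mem _ he', v, hv, hne⟩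
      · rintro ⟨e', he', v, hv, hne⟩
        rcases List.mem_cons.mp he' with rfl | he'
        · rw [h] at hv; cases hv
        · refine ⟨e', he', v, ?_, hne⟩
          rw [PySem.Dict.get?_insert]
          by_cases hee : e' = e
          · subst hee; rw [h] at hv; cases hv
          · rw [if_neg hee]; exact hv
    | some o =>
      simp only [apnInner, h]
      by_cases ho : o ≠ part
      · rw [if_pos ho]
        simp only [true_iff]
        exact ⟨e, List.mem_cons_self, o, h, ho⟩
      · rw [not_not] at ho; subst ho
        rw [if_neg (by simp), ih]
        constructor
        · rintro ⟨e', he', v, hv, hne⟩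
          exact ⟨e', List.mem_cons_of_mem _ he', v, hv, hne⟩
        · rintro ⟨e', he', v, hv, hne⟩
          rcases List.mem_cons.mp he' with rfl | he'
          · rw [h] at hv; cases hv; exact absurd rfl hne
          · exact ⟨e', he', v, hv, hne⟩

-- on success the resulting dict is the old one extended by `part` at the fresh elements of `es`
lemma apnInner_some_get? (part : List Int) (es : List Int) (d d' : PySem.Dict Int (List Int))
    (h : apnInner part es d = some d') (e : Int) :
    d'.get? e = (d.get? e).or (if e ∈ es then some part else none) := by
  induction es generalizing d with
  | nil =>
    simp only [apnInner, Option.some.injEq] at h; subst h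
    simp
  | cons e' es ih =>
    cases hd : d.get? e' with
    | none =>
      simp only [apnInner, hd] at h
      have hrec := ih _ h
      rw [PySem.Dict.get?_insert] at hrec
      by_cases hee : e = e'
      · subst hee
        rw [if_pos rfl] at hrec
        simp only [hd, Option.none_or] at hrec ⊢
        simp [hrec]
      · rw [if_neg hee] at hrec
        rw [hrec]
        simp [List.mem_cons, hee]
    | some o =>
      simp only [apnInner, hd] at h
      by_cases ho : o ≠ part
      · rw [if_pos ho] at h; cases h
      · rw [not_not] at ho; subst ho
        rw [if_neg (by simp)] at h
        have hrec := ih _ h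
        rw [hrec]
        by_cases hee : e = e'
        · subst hee; simp [hd]
        · simp [List.mem_cons, hee]

-- characterisation of the whole pass, generalised over the accumulated dict
lemma apnGo_true_iff (rest : List (List Int)) (d : PySem.Dict Int (List Int)) :
    apnGo rest d = true ↔
      ∀ x ∈ rest, ∀ e ∈ x, (∀ v, d.get? e = some v → v = x) ∧ (∀ y ∈ rest, e ∈ y → y = x) := by
  induction rest generalizing d with
  | nil => simp [apnGo]
  | cons part rest ih =>
    cases hin : apnInner part part d with
    | none =>
      simp only [apnGo, hin]
      rw [apnInner_eq_none_iff] at hin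
      obtain ⟨e, he, v, hv, hne⟩ := hin
      simp only [Bool.false_eq_true, false_iff]
      intro hall
      exact hne ((hall part List.mem_cons_self e he).1 v hv)
    | some d' =>
      simp only [apnGo, hin]
      have hnone : ∀ e ∈ part, ∀ v, d.get? e = some v → v = part := by
        intro e he v hv
        by_contra hne
        have hc : apnInner part part d = none :=
          (apnInner_eq_none_iff part part d).mpr ⟨e, he, v, hv, hne⟩
        rw [hc] at hin; cases hin
      have hget := apnInner_some_get? part part d d' hin
      -- d'.get? e in terms of d
      have hget_fresh : ∀ e ∈ part, d.get? e = none → d'.get? e = some part := by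
        intro e he hd
        rw [hget e, hd, if_pos he]; rfl
      have hget_old : ∀ e v, d.get? e = some v → d'.get? e = some v := by
        intro e v hd
        rw [hget e, hd]; rfl
      have hget_back : ∀ e v, d'.get? e = some v → d.get? e = some v ∨ (e ∈ part ∧ v = part) := by
        intro e v hv
        rw [hget e] at hv
        cases hd : d.get? e with
        | some w =>
          rw [hd, Option.some_or] at hv
          obtain rfl := Option.some.inj hv
          exact Or.inl rfl
        | none =>
          rw [hd, Option.none_or] at hv
          by_cases he : e ∈ part
          · rw [if_pos he] at hv
            obtain rfl := Option.some.inj hv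
            exact Or.inr ⟨he, rfl⟩
          · rw [if_neg he] at hv; cases hv
      rw [ih]
      constructor
      · -- from C(rest, d') to C(part :: rest, d)
        intro hall x hx e he
        rcases List.mem_cons.mp hx with hxp | hxr
        · subst hxp
          refine ⟨hnone e he, ?_⟩
          intro y hy hey
          rcases List.mem_cons.mp hy with hyp | hyr
          · subst hyp; rfl
          · -- y ∈ rest also contains e ∈ part: use d'-ownership of e
            have h1 := (hall y hyr e hey).1
            cases hd : d.get? e with
            | none => exact (h1 x (hget_fresh e he hd)).symm
            | some v =>
              have hv : v = x := hnone e he v hd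
              subst hv
              exact (h1 v (hget_old e v hd)).symm
        · refine ⟨?_, ?_⟩
          · intro v hv
            exact (hall x hxr e he).1 v (hget_old e v hv)
          · intro y hy hey
            rcases List.mem_cons.mp hy with hyp | hyr
            · subst hyp
              -- e also lies in the current part y
              have h1 := (hall x hxr e he).1
              cases hd : d.get? e with
              | none => exact h1 y (hget_fresh e hey hd)
              | some v =>
                have hv : v = y := hnone e hey v hd
                subst hv
                exact h1 v (hget_old e v hd)
            · exact (hall x hxr e he).2 y hyr hey
      · -- from C(part :: rest, d) to C(rest, d')
        intro hall x hx e he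
        refine ⟨?_, ?_⟩
        · intro v hv
          rcases hget_back e v hv with hd | ⟨hep, rfl⟩
          · exact (hall x (List.mem_cons_of_mem _ hx) e he).1 v hd
          · exact (hall x (List.mem_cons_of_mem _ hx) e he).2 v List.mem_cons_self hep
        · intro y hy hey
          exact (hall x (List.mem_cons_of_mem _ hx) e he).2 y (List.mem_cons_of_mem _ hy) hey

lemma A_true_iff (p : List (List Int)) :
    are_parts_nonoverlapping p = true ↔ ∀ x ∈ p, ∀ e ∈ x, ∀ y ∈ p, e ∈ y → y = x := by
  simp only [are_parts_nonoverlapping, Bool.not_eq_eq_eq_not, Bool.not_true, List.any_eq_false,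
    Bool.and_eq_true, bne_iff_ne, List.any_eq_true, List.contains_iff_mem, not_and, not_exists]
  constructor
  · intro h x hx e he y hy hey
    by_contra hne
    exact h y hy x hx hne e hey he
  · intro h x hx y hy hxy e he hey
    exact hxy (h x hx e he y hy hey).symm

lemma mem_apnDedup (l : List (List Int)) (seen : PySem.Set (List Int)) (x : List Int) :
    x ∈ apnDedup l seen ↔ x ∈ l ∧ x ∉ seen := by
  induction l generalizing seen with
  | nil => simp [apnDedup]
  | cons part rest ih =>
    rw [apnDedup]
    by_cases hc : part ∈ seen
    · rw [if_pos (by simp only [PySem.Set.contains_iff]; exact hc), ih]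
      constructor
      · rintro ⟨hx, hs⟩; exact ⟨List.mem_cons_of_mem _ hx, hs⟩
      · rintro ⟨hx, hs⟩
        rcases List.mem_cons.mp hx with rfl | hx
        · exact absurd hc hs
        · exact ⟨hx, hs⟩
    · rw [if_neg (by simp only [PySem.Set.contains_iff]; exact hc), List.mem_cons, ih]
      constructor
      · rintro (rfl | ⟨hx, hs⟩)
        · exact ⟨List.mem_cons_self, hc⟩
        · refine ⟨List.mem_cons_of_mem _ hx, fun h => hs ?_⟩
          exact (PySem.Set.mem_add _ _ _).mpr (Or.inl h)
      · rintro ⟨hx, hs⟩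
        rcases List.mem_cons.mp hx with rfl | hx
        · exact Or.inl rfl
        · by_cases hxp : x = part
          · exact Or.inl hxp
          · refine Or.inr ⟨hx, fun h => ?_⟩
            rcases (PySem.Set.mem_add _ _ _).mp h with h | h
            · exact hs h
            · exact hxp h

lemma mem_apnDedup_empty (p : List (List Int)) (x : List Int) :
    x ∈ apnDedup p PySem.Set.empty ↔ x ∈ p := by
  rw [mem_apnDedup]
  simp [PySem.Set.empty]

lemma B_true_iff (p : List (List Int)) :
    are_parts_nonoverlapping_alt p = true ↔ ∀ x ∈ p, ∀ e ∈ x, ∀ y ∈ p, e ∈ y → y = x := by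
  rw [are_parts_nonoverlapping_alt, apnGo_true_iff]
  constructor
  · intro h x hx e he y hy hey
    exact (h x ((mem_apnDedup_empty p x).mpr hx) e he).2 y ((mem_apnDedup_empty p y).mpr hy) hey
  · intro h x hx e he
    refine ⟨?_, ?_⟩
    · intro v hv
      rw [PySem.Dict.get?_empty] at hv
      cases hv
    · intro y hy hey
      exact h x ((mem_apnDedup_empty p x).mp hx) e he y ((mem_apnDedup_empty p y).mp hy) hey

-- ===== VERDICT (by name: the statement is the Claim_ definition above) =====
theorem are_parts_nonoverlapping_spec : Claim_equal_are_parts_nonoverlapping := by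
  intro p _
  unfold Spec_are_parts_nonoverlapping
  rw [Bool.eq_iff_iff, A_true_iff, B_true_iff]
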